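-- pv_equiv track=rewrite | github.com/mohammadfaiizan/ProjectI | DSA/Theory/Dynamic_Programming/016_dp_interview_problems.py | count_frog_jump_ways
-- ===== SOURCE A (Python) =====
-- def count_frog_jump_ways(n: int, k: int) -> int:
--     """
--     Count ways for frog to jump n steps with max k step size
--
--     Args:
--         n: Number of steps
--         k: Maximum step size
--
--     Returns:
--         Number of ways to reach step n
--     """
--     if n <= 0:
--         return 0 if n < 0 else 1
--
--     dp = [0] * (n + 1)
--     dp[0] = 1
--
--     for i in range(1, n + 1):
--         for j in range(1, min(i, k) + 1):
--             dp[i] += dp[i - j]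
--
--     return dp[n]
-- ===== SOURCE B (Python) =====
-- def count_frog_jump_ways(n: int, k: int) -> int:
--     """Sliding-window sum: dp[i] = window = sum of previous min(i, k) dp values, O(n)."""
--     if n < 0:
--         return 0
--     if n == 0:
--         return 1
--     if k <= 0:
--         return 0
--     dp = [0] * (n + 1)
--     dp[0] = 1
--     window = 1  # sum of dp[max(0, i-k) .. i-1]
--     for i in range(1, n + 1):
--         dp[i] = window
--         window += dp[i]
--         if i - k >= 0:
--             window -= dp[i - k]
--     return dp[n]
-- ===== Notes on version B (the rewrite author's own statement) =====
-- stated objective: faster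
-- what changed: Replaces the nested loop summing the last min(i,k) dp entries for each i by a single pass that maintains that sum as a sliding window (add dp[i], drop dp[i-k]).
import Mathlib
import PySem

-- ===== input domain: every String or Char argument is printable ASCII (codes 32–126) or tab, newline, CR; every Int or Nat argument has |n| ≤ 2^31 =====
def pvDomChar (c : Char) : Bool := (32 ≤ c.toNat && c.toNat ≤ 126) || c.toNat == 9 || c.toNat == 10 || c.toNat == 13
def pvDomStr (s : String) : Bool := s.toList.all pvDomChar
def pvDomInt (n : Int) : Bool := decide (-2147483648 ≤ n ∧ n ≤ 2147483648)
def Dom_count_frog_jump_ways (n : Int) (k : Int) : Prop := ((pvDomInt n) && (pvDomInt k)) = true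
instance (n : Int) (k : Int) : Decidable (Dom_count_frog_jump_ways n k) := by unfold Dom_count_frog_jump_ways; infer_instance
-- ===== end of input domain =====

-- B replaces A's O(n*k) nested summation by an O(n) sliding-window sum of the last k dp values.

-- ===== PORT A =====
def count_frog_jump_ways (n : Int) (k : Int) : Int :=
  if n ≤ 0 then (if n < 0 then 0 else 1)
  else
    let dp0 : List Int := PySem.List.pySetD (List.replicate ((n + 1).toNat) (0 : Int)) 0 1
    let dp := (PySem.List.pyRange 1 (n + 1) 1).foldl (fun dp i =>
        (PySem.List.pyRange 1 (min i k + 1) 1).foldl (fun d j =>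
          PySem.List.pySetD d i (PySem.List.pyGetD d i 0 + PySem.List.pyGetD d (i - j) 0)) dp) dp0
    PySem.List.pyGetD dp n 0

-- ===== PORT B =====
def count_frog_jump_ways_alt (n : Int) (k : Int) : Int :=
  if n < 0 then 0
  else if n = 0 then 1
  else if k ≤ 0 then 0
  else
    let dp0 : List Int := PySem.List.pySetD (List.replicate ((n + 1).toNat) (0 : Int)) 0 1
    let st := (PySem.List.pyRange 1 (n + 1) 1).foldl (fun (st : List Int × Int) i =>
        let dp := PySem.List.pySetD st.1 i st.2
        let w := st.2 + PySem.List.pyGetD dp i 0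
        (dp, if i - k ≥ 0 then w - PySem.List.pyGetD dp (i - k) 0 else w)) (dp0, 1)
    PySem.List.pyGetD st.1 n 0

-- ===== PRECONDITION & SPEC =====
def Spec_count_frog_jump_ways (n : Int) (k : Int) (out : Int) : Prop := out = count_frog_jump_ways_alt n k
instance (n : Int) (k : Int) (out : Int) : Decidable (Spec_count_frog_jump_ways n k out) := by unfold Spec_count_frog_jump_ways; infer_instance

-- ===== CLAIM (what is proved, stated in full; the proofs are below) =====
def Claim_equal_count_frog_jump_ways : Prop := ∀ (n : Int) (k : Int), Dom_count_frog_jump_ways n k → Spec_count_frog_jump_ways n k (count_frog_jump_ways n k)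

-- ===== LEMMAS AND PROOFS =====

-- Specification table: tab K m = [f 0, …, f m] where f i = number of ways to reach step i
-- with steps 1..K (f 0 = 1, f i = sum of the previous min(i, K) values).
def tab (K : Nat) : Nat → List Int
  | 0 => [1]
  | i + 1 => tab K i ++ [((tab K i).drop (i + 1 - min (i + 1) K)).sum]

def fv (K i : Nat) : Int := (tab K i).getD i 0

-- window value: sum of the last min(m+1, K) entries of tab K m
def W (K m : Nat) : Int := ∑ t ∈ Finset.Ico (m + 1 - min (m + 1) K) (m + 1), fv K t

lemma tab_length (K m : Nat) : (tab K m).length = m + 1 := by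
  induction m with
  | zero => rfl
  | succ i ih => simp [tab, ih]

lemma fv_zero (K : Nat) : fv K 0 = 1 := rfl

lemma getD_concat_length (l : List Int) (x : Int) : (l ++ [x]).getD l.length 0 = x := by
  simp [List.getD]

lemma fv_succ_drop (K i : Nat) :
    fv K (i + 1) = ((tab K i).drop (i + 1 - min (i + 1) K)).sum := by
  have h : i + 1 = (tab K i).length := (tab_length K i).symm
  conv_lhs => rw [fv, tab, h, getD_concat_length]
  rw [h]

lemma tab_succ (K i : Nat) : tab K (i + 1) = tab K i ++ [fv K (i + 1)] := by
  rw [fv_succ_drop]; rfl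

lemma tab_getD (K m : Nat) : ∀ t ≤ m, (tab K m).getD t 0 = fv K t := by
  induction m with
  | zero => intro t ht; interval_cases t; rfl
  | succ i ih =>
    intro t ht
    rw [tab_succ]
    rcases Nat.lt_or_ge t (i + 1) with h | h
    · rw [List.getD_append _ _ _ _ (by rw [tab_length]; omega)]
      exact ih t (by omega)
    · have ht1 : t = i + 1 := by omega
      subst ht1
      conv_lhs => rw [show i + 1 = (tab K i).length from (tab_length K i).symm,
        getD_concat_length]
      rw [tab_length]

lemma drop_sum (K m : Nat) : ∀ a ≤ m + 1, ((tab K m).drop a).sum = ∑ t ∈ Finset.Ico a (m + 1), fv K t := by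
  induction m with
  | zero =>
    intro a ha
    interval_cases a
    · simp [tab, fv_zero]
    · simp [tab]
  | succ i ih =>
    intro a ha
    rw [tab_succ]
    rcases Nat.lt_or_ge a (i + 2) with h | h
    · rw [List.drop_append_of_le_length (by rw [tab_length]; omega), List.sum_append]
      conv_rhs => rw [Finset.sum_Ico_succ_top (show a ≤ i + 1 by omega)]
      rw [ih a (by omega)]
      simp
    · have ha2 : a = i + 2 := by omega
      subst ha2
      rw [List.drop_eq_nil_of_le (by simp [tab_length])]
      simp

lemma fv_succ (K m : Nat) : fv K (m + 1) = W K m := by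
  rw [fv_succ_drop, W, drop_sum K m _ (by omega)]

lemma W_zero (K : Nat) (hK : 1 ≤ K) : W K 0 = 1 := by
  have h : 1 - min 1 K = 0 := by omega
  simp [W, h, fv_zero]

lemma W_succ (K m : Nat) (hK : 1 ≤ K) :
    W K (m + 1) = W K m + fv K (m + 1) - (if K ≤ m + 1 then fv K (m + 1 - K) else 0) := by
  unfold W
  by_cases hKm : K ≤ m + 1
  · rw [if_pos hKm]
    rw [show m + 1 + 1 - min (m + 1 + 1) K = m + 2 - K by omega,
        show m + 1 - min (m + 1) K = m + 1 - K by omega]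
    have top : ∑ t ∈ Finset.Ico (m + 1 - K) (m + 2), fv K t
        = (∑ t ∈ Finset.Ico (m + 1 - K) (m + 1), fv K t) + fv K (m + 1) :=
      Finset.sum_Ico_succ_top (by omega) _
    have bot : ∑ t ∈ Finset.Ico (m + 1 - K) (m + 2), fv K t
        = fv K (m + 1 - K) + ∑ t ∈ Finset.Ico (m + 1 - K + 1) (m + 2), fv K t :=
      Finset.sum_eq_sum_Ico_succ_bot (by omega) _
    rw [show m + 1 - K + 1 = m + 2 - K by omega] at bot
    linarith [top, bot]
  · rw [if_neg hKm]
    rw [show m + 1 + 1 - min (m + 1 + 1) K = 0 by omega,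
        show m + 1 - min (m + 1) K = 0 by omega,
        Finset.sum_Ico_succ_top (by omega)]
    ring

-- A's inner loop: repeated dp[i] += dp[i-j] accumulates the sum of the c entries before i.
lemma innerA (iN : Nat) (d : List Int) (hlen : iN < d.length) :
    ∀ c ≤ iN, (PySem.List.pyRange 1 ((c : Int) + 1) 1).foldl
      (fun d j => PySem.List.pySetD d (iN : Int)
        (PySem.List.pyGetD d (iN : Int) 0 + PySem.List.pyGetD d ((iN : Int) - j) 0)) d
    = d.set iN (d.getD iN 0 + ∑ t ∈ Finset.Ico (iN - c) iN, d.getD t 0) := by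
  intro c
  induction c with
  | zero =>
    intro _
    rw [show ((0 : Nat) : Int) + 1 = 1 by norm_num,
        PySem.List.pyRange_one_eq_nil (le_refl 1)]
    rw [List.foldl_nil, Nat.sub_zero, Finset.Ico_self, Finset.sum_empty, add_zero]
    rw [show d.getD iN 0 = d[iN] from List.getD_eq_getElem d 0 hlen,
        List.set_getElem_self hlen]
  | succ c ih =>
    intro hc
    rw [show ((c + 1 : Nat) : Int) + 1 = ((c : Int) + 1) + 1 by push_cast; ring,
        PySem.List.pyRange_one_succ_right (by omega), List.foldl_append,
        ih (by omega)]
    simp only [List.foldl_cons, List.foldl_nil]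
    rw [show (iN : Int) - ((c : Int) + 1) = ((iN - (c + 1) : Nat) : Int) by omega]
    simp only [PySem.List.pySetD_natCast, PySem.List.pyGetD_natCast]
    rw [List.set_set]
    have hne : iN - (c + 1) ≠ iN := by omega
    have hget1 : (d.set iN (d.getD iN 0 + ∑ t ∈ Finset.Ico (iN - c) iN, d.getD t 0)).getD iN 0
        = d.getD iN 0 + ∑ t ∈ Finset.Ico (iN - c) iN, d.getD t 0 := by
      simp [List.getD, hlen]
    have hget2 : (d.set iN (d.getD iN 0 + ∑ t ∈ Finset.Ico (iN - c) iN, d.getD t 0)).getD (iN - (c + 1)) 0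
        = d.getD (iN - (c + 1)) 0 := by
      simp [List.getD, (Ne.symm hne : iN ≠ iN - (c + 1))]
    rw [hget1, hget2,
        Finset.sum_eq_sum_Ico_succ_bot (show iN - (c + 1) < iN by omega) (fun t => d.getD t 0),
        show iN - (c + 1) + 1 = iN - c by omega]
    ring_nf

lemma pad_getD_lo (K m r t : Nat) (ht : t ≤ m) :
    (tab K m ++ List.replicate r (0 : Int)).getD t 0 = fv K t := by
  rw [List.getD_append _ _ _ _ (by rw [tab_length]; omega)]
  exact tab_getD K m t ht

lemma pad_getD_hi (K m r t : Nat) (ht : m + 1 ≤ t) :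
    (tab K m ++ List.replicate r (0 : Int)).getD t 0 = 0 := by
  unfold List.getD
  rw [List.getElem?_append_right (by rw [tab_length]; omega)]
  simp [List.getElem?_replicate]
  split <;> rfl

-- setting the first zero-slot of the padded table extends it by one table entry
lemma pad_set (K N m : Nat) (hm : m < N) :
    (tab K m ++ List.replicate (N - m) (0 : Int)).set (m + 1) (fv K (m + 1))
    = tab K (m + 1) ++ List.replicate (N - (m + 1)) 0 := by
  rw [show N - m = (N - (m + 1)) + 1 by omega, List.replicate_succ,
      List.set_append_right _ _ (by simp [tab_length])]
  rw [tab_length]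
  simp [tab_succ]

lemma outerA (K N : Nat) (hK : 1 ≤ K) : ∀ m, m ≤ N →
    (PySem.List.pyRange 1 ((m : Int) + 1) 1).foldl
      (fun dp i => (PySem.List.pyRange 1 (min i (K : Int) + 1) 1).foldl
        (fun d j => PySem.List.pySetD d i (PySem.List.pyGetD d i 0 + PySem.List.pyGetD d (i - j) 0)) dp)
      (PySem.List.pySetD (List.replicate (N + 1) (0 : Int)) 0 1)
    = tab K m ++ List.replicate (N - m) 0 := by
  intro m
  induction m with
  | zero =>
    intro _
    rw [show ((0 : Nat) : Int) + 1 = 1 by norm_num,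
        PySem.List.pyRange_one_eq_nil (le_refl 1)]
    simp [PySem.List.pySetD, PySem.List.pySet?, PySem.List.pyIdx?, List.replicate_succ, tab]
  | succ m ih =>
    intro hm
    rw [show ((m + 1 : Nat) : Int) + 1 = ((m : Int) + 1) + 1 by push_cast; ring,
        PySem.List.pyRange_one_succ_right (by omega), List.foldl_append,
        ih (by omega)]
    simp only [List.foldl_cons, List.foldl_nil]
    rw [show min ((m : Int) + 1) (K : Int) = ((min (m + 1) K : Nat) : Int) by
          rw [Nat.cast_min]; push_cast; omega,
        show (m : Int) + 1 = ((m + 1 : Nat) : Int) by push_cast; ring,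
        innerA (m + 1) _ (by simp [tab_length, List.length_replicate]; omega)
          (min (m + 1) K) (by omega)]
    rw [pad_getD_hi K m _ (m + 1) (le_refl _),
        Finset.sum_congr rfl (fun t htm => pad_getD_lo K m (N - m) t
          (by have := Finset.mem_Ico.mp htm; omega)),
        show (∑ t ∈ Finset.Ico (m + 1 - min (m + 1) K) (m + 1), fv K t) = fv K (m + 1) by
          rw [fv_succ_drop, drop_sum K m _ (by omega)]]
    rw [zero_add]
    exact pad_set K N m (by omega)

lemma outerB (K N : Nat) (hK : 1 ≤ K) : ∀ m, m ≤ N →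
    (PySem.List.pyRange 1 ((m : Int) + 1) 1).foldl
      (fun (st : List Int × Int) i =>
        let dp := PySem.List.pySetD st.1 i st.2
        let w := st.2 + PySem.List.pyGetD dp i 0
        (dp, if i - (K : Int) ≥ 0 then w - PySem.List.pyGetD dp (i - (K : Int)) 0 else w))
      (PySem.List.pySetD (List.replicate (N + 1) (0 : Int)) 0 1, 1)
    = (tab K m ++ List.replicate (N - m) 0, W K m) := by
  intro m
  induction m with
  | zero =>
    intro _
    rw [show ((0 : Nat) : Int) + 1 = 1 by norm_num,
        PySem.List.pyRange_one_eq_nil (le_refl 1)]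
    rw [List.foldl_nil, W_zero K hK]
    simp [PySem.List.pySetD, PySem.List.pySet?, PySem.List.pyIdx?, List.replicate_succ, tab]
  | succ m ih =>
    intro hm
    rw [show ((m + 1 : Nat) : Int) + 1 = ((m : Int) + 1) + 1 by push_cast; ring,
        PySem.List.pyRange_one_succ_right (by omega), List.foldl_append,
        ih (by omega)]
    simp only [List.foldl_cons, List.foldl_nil]
    rw [show (m : Int) + 1 = ((m + 1 : Nat) : Int) by push_cast; ring]
    simp only [PySem.List.pySetD_natCast, PySem.List.pyGetD_natCast]
    rw [show W K m = fv K (m + 1) from (fv_succ K m).symm, pad_set K N m (by omega)]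
    rw [show (tab K (m + 1) ++ List.replicate (N - (m + 1)) (0 : Int)).getD (m + 1) 0
          = fv K (m + 1) from pad_getD_lo K (m + 1) _ (m + 1) (le_refl _)]
    by_cases hKm : K ≤ m + 1
    · rw [if_pos (show ((m + 1 : Nat) : Int) - (K : Int) ≥ 0 by push_cast; omega),
          show ((m + 1 : Nat) : Int) - (K : Int) = ((m + 1 - K : Nat) : Int) by push_cast; omega]
      simp only [PySem.List.pyGetD_natCast]
      rw [pad_getD_lo K (m + 1) _ (m + 1 - K) (by omega)]
      rw [W_succ K m hK, if_pos hKm, fv_succ K m]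
    · rw [if_neg (show ¬ ((m + 1 : Nat) : Int) - (K : Int) ≥ 0 by push_cast; omega)]
      rw [W_succ K m hK, if_neg hKm, fv_succ K m]
      simp

-- ===== VERDICT (by name: the statement is the Claim_ definition above) =====
theorem count_frog_jump_ways_spec : Claim_equal_count_frog_jump_ways := by
  intro n k _
  unfold Spec_count_frog_jump_ways count_frog_jump_ways count_frog_jump_ways_alt
  by_cases hn0 : n ≤ 0
  · rw [if_pos hn0]
    by_cases hneg : n < 0
    · rw [if_pos hneg, if_pos hneg]
    · rw [if_neg hneg, if_neg hneg, if_pos (by omega)]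
  · rw [if_neg hn0, if_neg (by omega : ¬ n < 0), if_neg (by omega : ¬ n = 0)]
    have hN : n = ((n.toNat : Nat) : Int) := by omega
    set N := n.toNat with hNdef
    have hN1 : 1 ≤ N := by omega
    have htn : (n + 1).toNat = N + 1 := by omega
    by_cases hk0 : k ≤ 0
    · rw [if_pos hk0]
      have hstep : ∀ (dp : List Int) (i : Int),
          (PySem.List.pyRange 1 (min i k + 1) 1).foldl
            (fun d j => PySem.List.pySetD d i (PySem.List.pyGetD d i 0 + PySem.List.pyGetD d (i - j) 0)) dp = dp := by
        intro dp i
        rw [PySem.List.pyRange_one_eq_nil (by omega : min i k + 1 ≤ 1), List.foldl_nil]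
      simp only [hstep]
      rw [List.foldl_fixed' (fun _ => rfl) _]
      rw [htn, hN]
      rw [show (PySem.List.pySetD (List.replicate (N + 1) (0 : Int)) 0 1) = 1 :: List.replicate N 0 by
            simp [PySem.List.pySetD, PySem.List.pySet?, PySem.List.pyIdx?, List.replicate_succ]]
      simp only [PySem.List.pyGetD_natCast]
      have hz : ∀ (M : Nat), 1 ≤ M → (1 :: List.replicate M (0 : Int)).getD M 0 = 0 := by
        intro M hM
        obtain ⟨j, rfl⟩ := Nat.exists_eq_add_of_le hM
        rw [Nat.add_comm]
        simp [List.getD]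
      exact hz N hN1
    · rw [if_neg hk0]
      have hKc : k = ((k.toNat : Nat) : Int) := by omega
      set K := k.toNat with hKdef
      have hK1 : 1 ≤ K := by omega
      rw [htn, hN, hKc]
      simp only [outerA K N hK1 N (le_refl N), outerB K N hK1 N (le_refl N)]
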